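-- pv_equiv track=rewrite | github.com/AradhyaGupta/Part-of-Speech-tagging-using-HMM | hmmCode.py | creatEmissionMatrix
-- ===== SOURCE A (Python) =====
-- def creatEmissionMatrix(content):
--     dictEmission = {}
--     for lines in range(len(content)):
--         line = content[lines].split(" ")
--         for word in range(0,len(line)):
--             wordSplit = line[word].rsplit("/",1)
--             if wordSplit[0] in dictEmission:
--                 if wordSplit[1] in dictEmission[wordSplit[0]]:
--                     dictEmission[wordSplit[0]][wordSplit[1]] +=1
--                 else:
--                     dictEmission[wordSplit[0]][wordSplit[1]] =1
--             else:
--                 dictEmission[wordSplit[0]] ={wordSplit[1]:1}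
--     return dictEmission
-- ===== SOURCE B (Python) =====
-- def creatEmissionMatrix(content):
--     # Phase 1: flatten the corpus into a list of (word, tag) pairs.
--     pairs = []
--     for line in content:
--         for token in line.split(" "):
--             ws = token.rsplit("/", 1)
--             pairs.append((ws[0], ws[1]))
--     # Phase 2: count pairs in one flat dictionary.
--     counts = {}
--     for p in pairs:
--         counts[p] = counts.get(p, 0) + 1
--     # Phase 3: rebuild the nested word -> {tag: count} dictionary.
--     dictEmission = {}
--     for (word, tag), c in counts.items():
--         dictEmission.setdefault(word, {})[tag] = c
--     return dictEmission
-- ===== Notes on version B (the rewrite author's own statement) =====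
-- stated objective: alternative
-- what changed: Replaces A's incremental in-place updates of a nested dict-of-dicts by a three-phase pipeline: flatten the corpus into (word,tag) pairs, count them once in one flat dictionary keyed by the pair, then rebuild the nested word->{tag:count} dictionary in a second pass.
import Mathlib
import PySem

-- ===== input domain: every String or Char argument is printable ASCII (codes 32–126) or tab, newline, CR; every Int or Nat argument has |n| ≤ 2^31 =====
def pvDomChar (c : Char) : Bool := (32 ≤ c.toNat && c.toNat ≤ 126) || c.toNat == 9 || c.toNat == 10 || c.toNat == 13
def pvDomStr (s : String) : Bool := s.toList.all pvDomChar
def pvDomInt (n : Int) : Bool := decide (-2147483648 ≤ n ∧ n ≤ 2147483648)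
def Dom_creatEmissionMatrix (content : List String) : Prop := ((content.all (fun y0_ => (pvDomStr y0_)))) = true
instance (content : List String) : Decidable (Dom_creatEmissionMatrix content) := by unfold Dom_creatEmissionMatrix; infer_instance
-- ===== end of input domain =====

-- B rebuilds the nested emission dictionary from one flat pair-counting pass instead of A's
-- incremental nested-dict updates (objective: alternative decomposition, same cost).

-- exact port of Python s.rsplit("/", 1): no slash -> [s]; else [prefix before last slash, suffix].
-- split? never returns none for a non-empty separator, so .getD [] is exact.
def pyRsplit1 (s : String) : List String :=
  let parts := (PySem.Str.split? s "/").getD []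
  if parts.length = 1 then [s]
  else [PySem.Str.join "/" parts.dropLast, parts.getLastD ""]

-- ===== PORT A =====
def creatEmissionMatrix (content : List String) : List (String × List (String × Int)) :=
  let dictEmission :=
    content.foldl (fun d lineStr =>
      let line := (PySem.Str.split? lineStr " ").getD []
      line.foldl (fun d tok =>
        let ws := pyRsplit1 tok
        let w0 := ws.getD 0 ""
        -- wordSplit[1] raises IndexError when the token has no '/' (excluded by Pre_); default is never used inside Pre_
        let w1 := ws.getD 1 ""
        if d.contains w0 then
          let inner := d.getD w0 PySem.Dict.empty
          if inner.contains w1 then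
            d.insert w0 (inner.insert w1 (inner.getD w1 0 + 1))
          else
            d.insert w0 (inner.insert w1 1)
        else
          d.insert w0 (PySem.Dict.ofList [(w1, (1 : Int))])) d)
      (PySem.Dict.empty : PySem.Dict String (PySem.Dict String Int))
  dictEmission.items.map (fun p => (p.1, p.2.items))

-- ===== PORT B =====
def creatEmissionMatrix_alt (content : List String) : List (String × List (String × Int)) :=
  let pairs := content.flatMap (fun lineStr =>
    ((PySem.Str.split? lineStr " ").getD []).map (fun tok =>
      let ws := pyRsplit1 tok
      (ws.getD 0 "", ws.getD 1 "")))
  let counts := pairs.foldl (fun d p => d.insert p (d.getD p 0 + 1))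
      (PySem.Dict.empty : PySem.Dict (String × String) Int)
  let dictEmission := counts.items.foldl (fun d q =>
      let d1 := d.setdefault q.1.1 PySem.Dict.empty
      d1.insert q.1.1 ((d1.getD q.1.1 PySem.Dict.empty).insert q.1.2 q.2))
      (PySem.Dict.empty : PySem.Dict String (PySem.Dict String Int))
  dictEmission.items.map (fun p => (p.1, p.2.items))

-- ===== PRECONDITION & SPEC =====
-- Pre_ excludes exactly the inputs on which A raises IndexError: a space-separated token with no '/'.
def Pre_creatEmissionMatrix (content : List String) : Prop :=
  (content.all (fun s => ((PySem.Str.split? s " ").getD []).all (fun t => t.toList.contains '/'))) = true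
instance (content : List String) : Decidable (Pre_creatEmissionMatrix content) := by
  unfold Pre_creatEmissionMatrix; infer_instance
def pvWitness_creatEmissionMatrix : List String := ["the/DT dog/NN", "the/DT runs/VB"]

def Spec_creatEmissionMatrix (content : List String) (out : List (String × List (String × Int))) : Prop := out = creatEmissionMatrix_alt content
instance (content : List String) (out : List (String × List (String × Int))) : Decidable (Spec_creatEmissionMatrix content out) := by unfold Spec_creatEmissionMatrix; infer_instance

-- ===== CLAIM (what is proved, stated in full; the proofs are below) =====
def Claim_equal_creatEmissionMatrix : Prop := ∀ (content : List String), Dom_creatEmissionMatrix content → Pre_creatEmissionMatrix content → Spec_creatEmissionMatrix content (creatEmissionMatrix content)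

-- ===== LEMMAS AND PROOFS =====

-- the (word, tag) pair a token contributes
def pairOf (tok : String) : String × String :=
  let ws := pyRsplit1 tok
  (ws.getD 0 "", ws.getD 1 "")

-- uniform form of A's per-token update
def stepA (d : PySem.Dict String (PySem.Dict String Int)) (p : String × String) :
    PySem.Dict String (PySem.Dict String Int) :=
  d.insert p.1 ((d.getD p.1 PySem.Dict.empty).insert p.2
    ((d.getD p.1 PySem.Dict.empty).getD p.2 0 + 1))

-- uniform form of B's rebuild step
def stepB (d : PySem.Dict String (PySem.Dict String Int)) (q : (String × String) × Int) :
    PySem.Dict String (PySem.Dict String Int) :=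
  d.insert q.1.1 ((d.getD q.1.1 PySem.Dict.empty).insert q.1.2 q.2)

def wordsOf (ps : List (String × String)) : List String := PySem.Set.ofList (ps.map (·.1))
def tagsOf (ps : List (String × String)) (w : String) : List String :=
  PySem.Set.ofList ((ps.filter (fun p => p.1 == w)).map (·.2))

-- counts of the tags seen with word w, in first-occurrence order
def innerDict (ps : List (String × String)) (w : String) : PySem.Dict String Int :=
  PySem.Dict.mk ((tagsOf ps w).map (fun t => (t, (ps.count (w, t) : Int))))

-- the common normal form both folds reach
def specDict (ps : List (String × String)) : PySem.Dict String (PySem.Dict String Int) :=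
  PySem.Dict.mk ((wordsOf ps).map (fun w => (w, innerDict ps w)))

lemma stepA_eq (d : PySem.Dict String (PySem.Dict String Int)) (tok : String) :
    (let ws := pyRsplit1 tok
     let w0 := ws.getD 0 ""
     let w1 := ws.getD 1 ""
     if d.contains w0 then
       let inner := d.getD w0 PySem.Dict.empty
       if inner.contains w1 then
         d.insert w0 (inner.insert w1 (inner.getD w1 0 + 1))
       else
         d.insert w0 (inner.insert w1 1)
     else
       d.insert w0 (PySem.Dict.ofList [(w1, (1 : Int))])) = stepA d (pairOf tok) := by
  simp only [stepA, pairOf]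
  set w0 := (pyRsplit1 tok).getD 0 "" with hw0
  set w1 := (pyRsplit1 tok).getD 1 "" with hw1
  by_cases h0 : d.contains w0 = true
  · simp only [h0, if_true]
    by_cases h1 : (d.getD w0 PySem.Dict.empty).contains w1 = true
    · simp only [h1, if_true]
    · simp only [Bool.not_eq_true] at h1
      simp only [h1, Bool.false_eq_true, if_false,
        PySem.Dict.getD_of_not_contains _ _ h1, zero_add]
  · simp only [Bool.not_eq_true] at h0
    simp only [h0, Bool.false_eq_true, if_false,
      PySem.Dict.getD_of_not_contains _ _ h0, PySem.Dict.getD_empty, zero_add]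
    rfl

lemma foldl_flatMap_map {α β γ : Type} (f : γ → β → γ) (g : α → List β) (l : List α) (i : γ) :
    (l.flatMap g).foldl f i = l.foldl (fun a x => (g x).foldl f a) i := by
  induction l generalizing i with
  | nil => rfl
  | cons x xs ih => simp [List.flatMap_cons, List.foldl_append, ih]

-- dedup commutes with an outer map
lemma ofList_map_ofList {α β : Type} [BEq α] [LawfulBEq α] [BEq β] [LawfulBEq β] (f : α → β) (xs : List α) :
    PySem.Set.ofList ((PySem.Set.ofList xs).map f) = PySem.Set.ofList (xs.map f) := by
  induction xs using List.reverseRecOn with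
  | nil => rfl
  | append_singleton xs x ih =>
    rw [PySem.Set.ofList_append_singleton, List.map_append, List.map_singleton,
        PySem.Set.ofList_append_singleton]
    by_cases hx : x ∈ PySem.Set.ofList xs
    · rw [PySem.Set.add_of_mem hx, ih]
      have hfx : f x ∈ PySem.Set.ofList (xs.map f) := by
        rw [PySem.Set.mem_ofList]
        exact List.mem_map_of_mem ((PySem.Set.mem_ofList xs x).mp hx)
      rw [PySem.Set.add_of_mem hfx]
    · rw [PySem.Set.add_of_not_mem hx, List.map_append, List.map_singleton,
          PySem.Set.ofList_append_singleton, ih]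

-- dedup commutes with filter
lemma ofList_filter {α : Type} [BEq α] [LawfulBEq α] (q : α → Bool) (xs : List α) :
    PySem.Set.ofList (xs.filter q) = (PySem.Set.ofList xs).filter q := by
  induction xs using List.reverseRecOn with
  | nil => rfl
  | append_singleton xs x ih =>
    rw [List.filter_append, PySem.Set.ofList_append_singleton]
    by_cases hx : x ∈ PySem.Set.ofList xs
    · rw [PySem.Set.add_of_mem hx, ← ih]
      by_cases hq : q x = true
      · simp only [List.filter_singleton, hq, cond_true]
        rw [PySem.Set.ofList_append_singleton]
        have : x ∈ PySem.Set.ofList (xs.filter q) := by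
          rw [PySem.Set.mem_ofList, List.mem_filter]
          exact ⟨(PySem.Set.mem_ofList xs x).mp hx, hq⟩
        rw [PySem.Set.add_of_mem this]
      · simp only [Bool.not_eq_true] at hq
        simp only [List.filter_singleton, hq, cond_false, List.append_nil]
    · rw [PySem.Set.add_of_not_mem hx, List.filter_append, ← ih]
      by_cases hq : q x = true
      · simp only [List.filter_singleton, hq, cond_true]
        rw [PySem.Set.ofList_append_singleton]
        have : x ∉ PySem.Set.ofList (xs.filter q) := by
          rw [PySem.Set.mem_ofList, List.mem_filter]
          intro h; exact hx ((PySem.Set.mem_ofList xs x).mpr h.1)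
        rw [PySem.Set.add_of_not_mem this]
      · simp only [Bool.not_eq_true] at hq
        simp only [List.filter_singleton, hq, cond_false, List.append_nil]

-- dedup commutes with mapping the second component when all first components agree
lemma ofList_map_snd {α β : Type} [BEq α] [LawfulBEq α] [BEq β] [LawfulBEq β] (w : α) (l : List (α × β))
    (h : ∀ p ∈ l, p.1 = w) :
    PySem.Set.ofList (l.map (·.2)) = (PySem.Set.ofList l).map (·.2) := by
  induction l using List.reverseRecOn with
  | nil => rfl
  | append_singleton l p ih =>
    have hl : ∀ q ∈ l, q.1 = w := fun q hq => h q (List.mem_append_left _ hq)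
    have hp : p.1 = w := h p (List.mem_append_right _ (List.mem_singleton_self p))
    rw [List.map_append, List.map_singleton, PySem.Set.ofList_append_singleton,
        PySem.Set.ofList_append_singleton, ih hl]
    by_cases hx : p ∈ PySem.Set.ofList l
    · rw [PySem.Set.add_of_mem hx]
      have : p.2 ∈ (PySem.Set.ofList l).map (·.2) := List.mem_map_of_mem hx
      rw [PySem.Set.add_of_mem this]
    · have : p.2 ∉ (PySem.Set.ofList l).map (·.2) := by
        intro hmem
        obtain ⟨q, hq, hq2⟩ := List.mem_map.mp hmem
        have hq1 : q.1 = w := hl q ((PySem.Set.mem_ofList l q).mp hq)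
        have : q = p := Prod.ext (hq1.trans hp.symm) hq2
        exact hx (this ▸ hq)
      rw [PySem.Set.add_of_not_mem this, PySem.Set.add_of_not_mem hx,
          List.map_append, List.map_singleton]


lemma mem_tagsOf (ps : List (String × String)) (w t : String) :
    t ∈ tagsOf ps w ↔ (w, t) ∈ ps := by
  simp only [tagsOf, PySem.Set.mem_ofList, List.mem_map, List.mem_filter, beq_iff_eq]
  constructor
  · rintro ⟨⟨a, b⟩, ⟨hq, hq1⟩, hq2⟩
    dsimp only at hq1 hq2; subst hq1; subst hq2; exact hq
  · intro h; exact ⟨(w, t), ⟨h, rfl⟩, rfl⟩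

lemma mem_wordsOf (ps : List (String × String)) (w : String) :
    w ∈ wordsOf ps ↔ ∃ t, (w, t) ∈ ps := by
  simp only [wordsOf, PySem.Set.mem_ofList, List.mem_map]
  constructor
  · rintro ⟨q, hq, rfl⟩; exact ⟨q.2, hq⟩
  · rintro ⟨t, ht⟩; exact ⟨(w, t), ht, rfl⟩

lemma keys_specDict (ps : List (String × String)) : (specDict ps).keys = wordsOf ps := by
  simp [specDict, PySem.Dict.keys_mk, List.map_map, Function.comp_def]

lemma nodup_keys_specDict (ps : List (String × String)) : (specDict ps).keys.Nodup := by
  rw [keys_specDict]; exact PySem.Set.nodup_ofList _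

lemma contains_specDict (ps : List (String × String)) (w : String) :
    (specDict ps).contains w = decide (w ∈ wordsOf ps) := by
  rw [PySem.Dict.contains_eq_decide_mem_keys, keys_specDict]

lemma keys_innerDict (ps : List (String × String)) (w : String) :
    (innerDict ps w).keys = tagsOf ps w := by
  simp [innerDict, PySem.Dict.keys_mk, List.map_map, Function.comp_def]

lemma nodup_keys_innerDict (ps : List (String × String)) (w : String) :
    (innerDict ps w).keys.Nodup := by
  rw [keys_innerDict]; exact PySem.Set.nodup_ofList _

lemma getD_specDict_mem (ps : List (String × String)) {w : String} (hw : w ∈ wordsOf ps) :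
    (specDict ps).getD w PySem.Dict.empty = innerDict ps w := by
  exact PySem.Dict.getD_of_mem_items _
    (List.mem_map_of_mem (f := fun w => (w, innerDict ps w)) hw) (nodup_keys_specDict ps) _

lemma getD_innerDict_mem (ps : List (String × String)) {w t : String} (ht : t ∈ tagsOf ps w) :
    (innerDict ps w).getD t 0 = (ps.count (w, t) : Int) := by
  exact PySem.Dict.getD_of_mem_items _
    (List.mem_map_of_mem (f := fun t => (t, (ps.count (w, t) : Int))) ht)
    (nodup_keys_innerDict ps w) _

lemma contains_innerDict (ps : List (String × String)) (w t : String) :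
    (innerDict ps w).contains t = decide (t ∈ tagsOf ps w) := by
  rw [PySem.Dict.contains_eq_decide_mem_keys, keys_innerDict]

lemma wordsOf_append (ps : List (String × String)) (p : String × String) :
    wordsOf (ps ++ [p]) = PySem.Set.add (wordsOf ps) p.1 := by
  simp [wordsOf, PySem.Set.ofList_append_singleton]

lemma tagsOf_append_ne (ps : List (String × String)) (p : String × String) {w : String}
    (h : p.1 ≠ w) : tagsOf (ps ++ [p]) w = tagsOf ps w := by
  simp [tagsOf, List.filter_append, h]

lemma tagsOf_append_self (ps : List (String × String)) (p : String × String) :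
    tagsOf (ps ++ [p]) p.1 = PySem.Set.add (tagsOf ps p.1) p.2 := by
  simp [tagsOf, List.filter_append, PySem.Set.ofList_append_singleton]

lemma count_append_singleton (ps : List (String × String)) (p x : String × String) :
    (ps ++ [p]).count x = ps.count x + (if p = x then 1 else 0) := by
  simp [List.count_append, List.count_cons, List.count_nil, beq_iff_eq]

lemma innerDict_append_ne (ps : List (String × String)) (p : String × String) {w : String}
    (h : p.1 ≠ w) : innerDict (ps ++ [p]) w = innerDict ps w := by
  unfold innerDict
  rw [tagsOf_append_ne ps p h]
  congr 1
  apply List.map_congr_left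
  intro t' _
  rw [count_append_singleton, if_neg (fun he => h (by rw [he])), Nat.add_zero]

lemma tagsOf_eq_nil_of_not_word (ps : List (String × String)) {w : String}
    (hw : w ∉ wordsOf ps) : tagsOf ps w = [] := by
  have : ps.filter (fun p => p.1 == w) = [] := by
    rw [List.filter_eq_nil_iff]
    intro q hq hbeq
    exact hw ((mem_wordsOf ps w).mpr ⟨q.2, by
      have : q.1 = w := by simpa using hbeq
      rw [← this]; exact hq⟩)
  rw [tagsOf, this]
  rfl

lemma count_eq_zero_of_not_tag (ps : List (String × String)) {w t : String}
    (ht : t ∉ tagsOf ps w) : ps.count (w, t) = 0 :=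
  List.count_eq_zero.mpr (fun hmem => ht ((mem_tagsOf ps w t).mpr hmem))

lemma innerDict_append_self (ps : List (String × String)) (w t : String) :
    innerDict (ps ++ [(w, t)]) w =
      (innerDict ps w).insert t ((ps.count (w, t) : Int) + 1) := by
  have htags : tagsOf (ps ++ [(w, t)]) w = PySem.Set.add (tagsOf ps w) t :=
    tagsOf_append_self ps (w, t)
  by_cases ht : t ∈ tagsOf ps w
  · apply PySem.Dict.ext
    symm
    rw [PySem.Dict.items_insert_of_contains _ _
      (by rw [contains_innerDict]; exact decide_eq_true ht)]
    show List.map _ ((tagsOf ps w).map _) = List.map _ (tagsOf (ps ++ [(w, t)]) w)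
    rw [htags, PySem.Set.add_of_mem ht, List.map_map]
    apply List.map_congr_left
    intro t' ht'
    simp only [Function.comp_def]
    by_cases htt : t' = t
    · subst htt
      simp only [beq_self_eq_true, if_pos]
      rw [count_append_singleton, if_pos rfl, Nat.cast_add, Nat.cast_one]
    · simp only [beq_iff_eq, htt, if_false]
      rw [count_append_singleton, if_neg (fun he => htt (congrArg Prod.snd he).symm ), Nat.add_zero]
  · apply PySem.Dict.ext
    symm
    rw [PySem.Dict.items_insert_of_not_contains _ _
      (by rw [contains_innerDict]; exact decide_eq_false ht)]
    show (tagsOf ps w).map _ ++ [(t, (ps.count (w, t) : Int) + 1)]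
        = List.map _ (tagsOf (ps ++ [(w, t)]) w)
    rw [htags, PySem.Set.add_of_not_mem ht, List.map_append, List.map_singleton]
    congr 1
    · apply List.map_congr_left
      intro t' ht'
      have htt : t' ≠ t := fun he => ht (he ▸ ht')
      rw [count_append_singleton, if_neg (fun he => htt (congrArg Prod.snd he).symm), Nat.add_zero]
    · rw [count_append_singleton, if_pos rfl, Nat.cast_add, Nat.cast_one]

lemma stepA_specDict (ps : List (String × String)) (p : String × String) :
    stepA (specDict ps) p = specDict (ps ++ [p]) := by
  obtain ⟨w, t⟩ := p
  simp only [stepA]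
  by_cases hw : w ∈ wordsOf ps
  · rw [getD_specDict_mem ps hw]
    by_cases ht : t ∈ tagsOf ps w
    · rw [getD_innerDict_mem ps ht]
      rw [← innerDict_append_self ps w t]
      apply PySem.Dict.ext
      rw [PySem.Dict.items_insert_of_contains _ _
        (by rw [contains_specDict]; exact decide_eq_true hw)]
      show List.map _ ((wordsOf ps).map _) = List.map _ (wordsOf (ps ++ [(w, t)]))
      rw [wordsOf_append, PySem.Set.add_of_mem hw, List.map_map]
      apply List.map_congr_left
      intro w' hw'
      simp only [Function.comp_def]
      by_cases hww : w' = w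
      · subst hww; simp only [beq_self_eq_true, if_pos]
      · simp only [beq_iff_eq, hww, if_false]
        rw [innerDict_append_ne ps (w, t) (fun he => hww he.symm)]
    · have hgd : (innerDict ps w).getD t 0 = 0 :=
        PySem.Dict.getD_of_not_contains _ _
          (by rw [contains_innerDict]; exact decide_eq_false ht)
      rw [hgd]
      have : (0 : Int) + 1 = (ps.count (w, t) : Int) + 1 := by
        rw [count_eq_zero_of_not_tag ps ht]; rfl
      rw [this, ← innerDict_append_self ps w t]
      apply PySem.Dict.ext
      rw [PySem.Dict.items_insert_of_contains _ _
        (by rw [contains_specDict]; exact decide_eq_true hw)]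
      show List.map _ ((wordsOf ps).map _) = List.map _ (wordsOf (ps ++ [(w, t)]))
      rw [wordsOf_append, PySem.Set.add_of_mem hw, List.map_map]
      apply List.map_congr_left
      intro w' hw'
      simp only [Function.comp_def]
      by_cases hww : w' = w
      · subst hww; simp only [beq_self_eq_true, if_pos]
      · simp only [beq_iff_eq, hww, if_false]
        rw [innerDict_append_ne ps (w, t) (fun he => hww he.symm)]
  · have hc : (specDict ps).contains w = false := by
      rw [contains_specDict]; exact decide_eq_false hw
    rw [PySem.Dict.getD_of_not_contains _ _ hc, PySem.Dict.getD_empty, zero_add]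
    apply PySem.Dict.ext
    rw [PySem.Dict.items_insert_of_not_contains _ _ hc]
    show (wordsOf ps).map _ ++ [(w, (PySem.Dict.empty : PySem.Dict String Int).insert t 1)]
        = List.map _ (wordsOf (ps ++ [(w, t)]))
    rw [wordsOf_append, PySem.Set.add_of_not_mem hw, List.map_append, List.map_singleton]
    congr 1
    · apply List.map_congr_left
      intro w' hw'
      have hww : w ≠ w' := fun he => hw (he ▸ hw')
      rw [innerDict_append_ne ps (w, t) hww]
    · have h1 : innerDict (ps ++ [(w, t)]) w =
          (innerDict ps w).insert t ((ps.count (w, t) : Int) + 1) :=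
        innerDict_append_self ps w t
      have h2 : innerDict ps w = PySem.Dict.empty := by
        unfold innerDict
        rw [tagsOf_eq_nil_of_not_word ps hw]
        rfl
      rw [show ((w, (PySem.Dict.empty : PySem.Dict String Int).insert t 1) : String × PySem.Dict String Int)
            = (w, innerDict (ps ++ [(w, t)]) w) from by
          rw [h1, h2, count_eq_zero_of_not_tag ps
            (fun hmem => hw ((mem_wordsOf ps w).mpr ⟨t, (mem_tagsOf ps w t).mp hmem⟩))]
          rfl]

lemma foldA_spec (ps : List (String × String)) :
    ps.foldl stepA PySem.Dict.empty = specDict ps := by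
  induction ps using List.reverseRecOn with
  | nil => rfl
  | append_singleton ps p ih => rw [List.foldl_append, List.foldl_cons, List.foldl_nil, ih, stepA_specDict]

-- the dict B's rebuild loop produces from a list of ((word, tag), count) entries
def innerB (L : List ((String × String) × Int)) (w : String) : PySem.Dict String Int :=
  PySem.Dict.mk ((L.filter (fun q => q.1.1 == w)).map (fun q => (q.1.2, q.2)))

def groupDict (L : List ((String × String) × Int)) : PySem.Dict String (PySem.Dict String Int) :=
  PySem.Dict.mk ((PySem.Set.ofList (L.map (·.1.1))).map (fun w => (w, innerB L w)))

lemma keys_groupDict (L : List ((String × String) × Int)) :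
    (groupDict L).keys = PySem.Set.ofList (L.map (·.1.1)) := by
  simp [groupDict, PySem.Dict.keys_mk, List.map_map, Function.comp_def]

lemma contains_groupDict (L : List ((String × String) × Int)) (w : String) :
    (groupDict L).contains w = decide (w ∈ PySem.Set.ofList (L.map (·.1.1))) := by
  rw [PySem.Dict.contains_eq_decide_mem_keys, keys_groupDict]

lemma nodup_keys_groupDict (L : List ((String × String) × Int)) :
    (groupDict L).keys.Nodup := by
  rw [keys_groupDict]; exact PySem.Set.nodup_ofList _

lemma getD_groupDict_mem (L : List ((String × String) × Int)) {w : String}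
    (hw : w ∈ PySem.Set.ofList (L.map (·.1.1))) :
    (groupDict L).getD w PySem.Dict.empty = innerB L w := by
  exact PySem.Dict.getD_of_mem_items (groupDict L)
    (List.mem_map_of_mem (f := fun w => (w, innerB L w)) hw)
    (nodup_keys_groupDict L) _

lemma keys_innerB (L : List ((String × String) × Int)) (w : String) :
    (innerB L w).keys = (L.filter (fun q => q.1.1 == w)).map (fun q => q.1.2) := by
  simp [innerB, PySem.Dict.keys_mk, List.map_map, Function.comp_def]

lemma innerB_append_ne (L : List ((String × String) × Int)) (q : (String × String) × Int)
    {w : String} (h : q.1.1 ≠ w) : innerB (L ++ [q]) w = innerB L w := by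
  unfold innerB
  simp [List.filter_append, h]

lemma foldB_generic (L : List ((String × String) × Int)) (h : (L.map (·.1)).Nodup) :
    L.foldl stepB PySem.Dict.empty = groupDict L := by
  induction L using List.reverseRecOn with
  | nil => rfl
  | append_singleton L q ih =>
    have hL : (L.map (·.1)).Nodup := by
      rw [List.map_append] at h; exact h.sublist (List.sublist_append_left _ _)
    have hq : q.1 ∉ L.map (·.1) := by
      rw [List.map_append, List.map_singleton] at h
      intro hx
      exact (List.nodup_append.mp h).2.2 q.1 hx q.1 (List.mem_singleton_self _) rfl
    rw [List.foldl_append, List.foldl_cons, List.foldl_nil, ih hL]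
    obtain ⟨⟨w, t⟩, c⟩ := q
    simp only [stepB]
    have hfilter_self : (L ++ [((w, t), c)]).filter (fun q => q.1.1 == w)
        = L.filter (fun q => q.1.1 == w) ++ [((w, t), c)] := by
      simp [List.filter_append]
    have hwords : PySem.Set.ofList ((L ++ [((w, t), c)]).map (·.1.1))
        = PySem.Set.add (PySem.Set.ofList (L.map (·.1.1))) w := by
      simp [PySem.Set.ofList_append_singleton]
    by_cases hw : w ∈ PySem.Set.ofList (L.map (·.1.1))
    · rw [getD_groupDict_mem L hw]
      have htnot : (innerB L w).contains t = false := by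
        rw [PySem.Dict.contains_eq_decide_mem_keys, keys_innerB]
        apply decide_eq_false
        intro hmem
        obtain ⟨r, hr, hr2⟩ := List.mem_map.mp hmem
        have hr1 : r.1.1 = w := by simpa using (List.mem_filter.mp hr).2
        have : r.1 = (w, t) := Prod.ext hr1 hr2
        exact hq (this ▸ List.mem_map_of_mem (f := (·.1)) (List.mem_filter.mp hr).1)
      have hinner : (innerB L w).insert t c = innerB (L ++ [((w, t), c)]) w := by
        apply PySem.Dict.ext
        rw [PySem.Dict.items_insert_of_not_contains _ _ htnot]
        show (L.filter _).map _ ++ [(t, c)] = (innerB (L ++ [((w, t), c)]) w).items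
        rw [innerB, hfilter_self, List.map_append, List.map_singleton]
      rw [hinner]
      apply PySem.Dict.ext
      rw [PySem.Dict.items_insert_of_contains _ _
        (by rw [contains_groupDict]; exact decide_eq_true hw)]
      show List.map _ ((PySem.Set.ofList (L.map (·.1.1))).map _)
          = ((PySem.Set.ofList ((L ++ [((w, t), c)]).map (·.1.1))).map _)
      rw [hwords, PySem.Set.add_of_mem hw, List.map_map]
      apply List.map_congr_left
      intro w' hw'
      simp only [Function.comp_def]
      by_cases hww : w' = w
      · subst hww; simp only [beq_self_eq_true, if_pos]
      · simp only [beq_iff_eq, hww, if_false]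
        rw [innerB_append_ne L _ (show ((w, t) : String × String).1 ≠ w' from fun he => hww he.symm)]
    · have hc : (groupDict L).contains w = false := by
        rw [contains_groupDict]; exact decide_eq_false hw
      rw [PySem.Dict.getD_of_not_contains _ _ hc]
      apply PySem.Dict.ext
      rw [PySem.Dict.items_insert_of_not_contains _ _ hc]
      show (PySem.Set.ofList (L.map (·.1.1))).map _ ++ [(w, (PySem.Dict.empty : PySem.Dict String Int).insert t c)]
          = ((PySem.Set.ofList ((L ++ [((w, t), c)]).map (·.1.1))).map _)
      rw [hwords, PySem.Set.add_of_not_mem hw, List.map_append, List.map_singleton]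
      congr 1
      · apply List.map_congr_left
        intro w' hw'
        have hww : ((w, t) : String × String).1 ≠ w' := fun he => hw (by rw [show w = w' from he]; exact hw')
        rw [innerB_append_ne L _ hww]
      · have hnil : L.filter (fun q => q.1.1 == w) = [] := by
          rw [List.filter_eq_nil_iff]
          intro r hr hbeq
          refine hw ((PySem.Set.mem_ofList _ _).mpr ?_)
          have : r.1.1 = w := by simpa using hbeq
          rw [← this]
          exact List.mem_map_of_mem (f := (·.1.1)) hr
        have : innerB (L ++ [((w, t), c)]) w = PySem.Dict.mk [(t, c)] := by
          rw [innerB, hfilter_self, hnil]; rfl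
        rw [this]
        rfl

lemma stepB_setdefault (d : PySem.Dict String (PySem.Dict String Int)) (q : (String × String) × Int) :
    (let d1 := d.setdefault q.1.1 PySem.Dict.empty
     d1.insert q.1.1 ((d1.getD q.1.1 PySem.Dict.empty).insert q.1.2 q.2)) = stepB d q := by
  simp only [stepB]
  by_cases h : d.contains q.1.1 = true
  · simp [PySem.Dict.setdefault_of_contains _ _ h]
  · simp only [Bool.not_eq_true] at h
    rw [PySem.Dict.setdefault_of_not_contains _ _ h,
        PySem.Dict.getD_insert_self, PySem.Dict.insert_insert_self,
        PySem.Dict.getD_of_not_contains _ _ h]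

lemma foldB_spec (ps : List (String × String)) :
    ((PySem.Dict.counter ps).items).foldl stepB PySem.Dict.empty = specDict ps := by
  rw [PySem.Dict.items_counter]
  set L := (PySem.Set.ofList ps).map (fun k => (k, (ps.count k : Int))) with hL
  have hkeys : L.map (·.1) = PySem.Set.ofList ps := by
    rw [hL, List.map_map]; simp [Function.comp_def]
  rw [foldB_generic L (by rw [hkeys]; exact PySem.Set.nodup_ofList ps)]
  have hwords : PySem.Set.ofList (L.map (·.1.1)) = wordsOf ps := by
    have h1 : L.map (·.1.1) = (PySem.Set.ofList ps).map (·.1) := by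
      rw [hL, List.map_map]; simp [Function.comp_def]
    rw [h1, ofList_map_ofList]; rfl
  unfold groupDict specDict
  rw [hwords]
  congr 1
  apply List.map_congr_left
  intro w hw
  congr 1
  have hfil : L.filter (fun q => q.1.1 == w)
      = ((PySem.Set.ofList ps).filter (fun k => k.1 == w)).map (fun k => (k, (ps.count k : Int))) := by
    rw [hL, List.filter_map]; rfl
  set S := PySem.Set.ofList (ps.filter (fun k => k.1 == w)) with hS
  have hSf : (PySem.Set.ofList ps).filter (fun k => k.1 == w) = S :=
    (ofList_filter (fun k => k.1 == w) ps).symm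
  have hall : ∀ p ∈ ps.filter (fun k => k.1 == w), p.1 = w := by
    intro p hp; simpa using (List.mem_filter.mp hp).2
  have hallS : ∀ p ∈ S, p.1 = w := by
    intro p hp; exact hall p ((PySem.Set.mem_ofList _ _).mp hp)
  have htags : tagsOf ps w = S.map (·.2) := by
    rw [tagsOf, ofList_map_snd w _ hall]
  unfold innerB innerDict
  rw [hfil, hSf, List.map_map, htags, List.map_map]
  congr 1
  apply List.map_congr_left
  intro k hk
  have hk1 : k.1 = w := hallS k hk
  show (k.2, (ps.count k : Int)) = (k.2, (ps.count (w, k.2) : Int))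
  rw [show ((w, k.2) : String × String) = k from Prod.ext hk1.symm rfl]

lemma portA_eq_specDict (content : List String) :
    creatEmissionMatrix content =
      (specDict ((content.flatMap (fun l => (PySem.Str.split? l " ").getD [])).map pairOf)).items.map
        (fun p => (p.1, p.2.items)) := by
  unfold creatEmissionMatrix
  rw [show (fun (d : PySem.Dict String (PySem.Dict String Int)) (tok : String) =>
        let ws := pyRsplit1 tok
        let w0 := ws.getD 0 ""
        let w1 := ws.getD 1 ""
        if d.contains w0 then
          let inner := d.getD w0 PySem.Dict.empty
          if inner.contains w1 then
            d.insert w0 (inner.insert w1 (inner.getD w1 0 + 1))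
          else
            d.insert w0 (inner.insert w1 1)
        else
          d.insert w0 (PySem.Dict.ofList [(w1, (1 : Int))]))
      = (fun d tok => stepA d (pairOf tok)) from
        funext fun d => funext fun tok => stepA_eq d tok]
  rw [← foldl_flatMap_map, ← List.foldl_map, foldA_spec]

lemma portB_eq_specDict (content : List String) :
    creatEmissionMatrix_alt content =
      (specDict ((content.flatMap (fun l => (PySem.Str.split? l " ").getD [])).map pairOf)).items.map
        (fun p => (p.1, p.2.items)) := by
  unfold creatEmissionMatrix_alt
  rw [show (fun (tok : String) =>
        let ws := pyRsplit1 tok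
        (ws.getD 0 "", ws.getD 1 "")) = pairOf from rfl]
  rw [show (content.flatMap (fun lineStr => ((PySem.Str.split? lineStr " ").getD []).map pairOf))
      = (content.flatMap (fun l => (PySem.Str.split? l " ").getD [])).map pairOf from
        (List.map_flatMap).symm]
  show List.map (fun (p : String × PySem.Dict String Int) => (p.1, p.2.items))
      (List.foldl
        (fun (d : PySem.Dict String (PySem.Dict String Int)) (q : (String × String) × Int) =>
          let d1 := d.setdefault q.1.1 PySem.Dict.empty
          d1.insert q.1.1 ((d1.getD q.1.1 PySem.Dict.empty).insert q.1.2 q.2))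
        PySem.Dict.empty
        (List.foldl
          (fun (d : PySem.Dict (String × String) Int) (p : String × String) =>
            d.insert p (d.getD p 0 + 1))
          PySem.Dict.empty
          (List.map pairOf (List.flatMap (fun l => (PySem.Str.split? l " ").getD []) content))).items).items
    = _
  rw [PySem.Dict.foldl_insert_getD_add_one_eq_counter]
  rw [show (fun (d : PySem.Dict String (PySem.Dict String Int)) (q : (String × String) × Int) =>
        let d1 := d.setdefault q.1.1 PySem.Dict.empty
        d1.insert q.1.1 ((d1.getD q.1.1 PySem.Dict.empty).insert q.1.2 q.2))
      = stepB from funext fun d => funext fun q => stepB_setdefault d q]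
  rw [foldB_spec]

-- ===== VERDICT (by name: the statement is the Claim_ definition above) =====
theorem creatEmissionMatrix_spec : Claim_equal_creatEmissionMatrix := by
  intro content _ _
  show creatEmissionMatrix content = creatEmissionMatrix_alt content
  rw [portA_eq_specDict, portB_eq_specDict]
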